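-- pv_equiv track=rewrite | github.com/nicolas-boisseau/AdventOfCode2023 | day22/impl.py | get_removable_cube_ids
-- ===== SOURCE A (Python) =====
-- def get_removable_cube_ids(cubes, supporting, supported_by):
--     removable = {}
--     for cube in cubes:
--         blocks, id = cube
--         if len(supporting[id]) == 0:
--             removable[id] = True
--             continue
--         else:
--             if all([len(supported_by[supporting_]) > 1 for supporting_ in supporting[id]]):
--                 removable[id] = True
--                 continue
--     return removable
-- ===== SOURCE B (Python) =====
-- def get_removable_cube_ids(cubes, supporting, supported_by):
--     fragile = {s for s in supported_by if len(supported_by[s]) <= 1}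
--     removable = {id: fragile.isdisjoint(supporting[id]) for id in supporting}
--     return {id: True for _, id in cubes if removable[id]}
-- ===== Notes on version B (the rewrite author's own statement) =====
-- stated objective: simpler
-- what changed: A decides each cube inside its loop with an inner pass over that cube's supporters (a lookup and a count per supporter, plus a special empty branch); B instead stages the work: one pass over supported_by builds the set of fragile cubes (<=1 supporters), one pass over supporting builds a removable table (id -> its supporters avoid the fragile set), and the final cube loop is a bare table lookup with no scan and no branch on emptiness.
import Mathlib
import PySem

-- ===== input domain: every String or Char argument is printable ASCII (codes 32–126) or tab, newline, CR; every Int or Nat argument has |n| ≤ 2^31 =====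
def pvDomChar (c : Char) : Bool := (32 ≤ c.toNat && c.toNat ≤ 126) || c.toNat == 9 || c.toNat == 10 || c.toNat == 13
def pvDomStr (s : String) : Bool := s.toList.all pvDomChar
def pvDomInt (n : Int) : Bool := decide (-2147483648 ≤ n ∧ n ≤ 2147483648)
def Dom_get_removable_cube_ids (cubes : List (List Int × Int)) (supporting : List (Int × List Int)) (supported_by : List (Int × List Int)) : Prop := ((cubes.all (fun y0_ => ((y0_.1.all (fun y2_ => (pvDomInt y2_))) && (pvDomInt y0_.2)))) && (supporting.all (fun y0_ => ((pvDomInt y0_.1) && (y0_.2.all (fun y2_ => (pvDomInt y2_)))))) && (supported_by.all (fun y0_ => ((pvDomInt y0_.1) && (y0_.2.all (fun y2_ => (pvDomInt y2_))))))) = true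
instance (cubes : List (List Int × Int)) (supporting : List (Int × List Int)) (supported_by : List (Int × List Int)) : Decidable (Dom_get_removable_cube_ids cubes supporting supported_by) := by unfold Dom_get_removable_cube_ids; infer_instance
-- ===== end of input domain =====

-- B replaces A's per-cube inner pass (lookup every supporter and count its supporters, with a
-- separate empty-list branch) by staged precomputations — the set of fragile cubes (≤ 1
-- supporters) from supported_by, then a removable table over supporting — so the final cube
-- loop is a bare table lookup (objective: simpler).

-- ===== PORT A =====
-- supporting[id] / supported_by[s] are dict lookups that raise KeyError on a missing key;
-- ported as getD with [] — Pre_ excludes exactly the missing-key inputs.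
def get_removable_cube_ids (cubes : List (List Int × Int)) (supporting : List (Int × List Int)) (supported_by : List (Int × List Int)) : List (Int × Bool) :=
  (cubes.foldl (fun removable cube =>
      let id := cube.2
      if ((PySem.Dict.mk supporting).getD id []).length = 0 then
        removable.insert id true
      else
        if (((PySem.Dict.mk supporting).getD id []).map
              (fun supporting_ => decide (((PySem.Dict.mk supported_by).getD supporting_ []).length > 1))).all
            (fun b => b) then
          removable.insert id true
        else removable)
    PySem.Dict.empty).items

-- ===== PORT B =====
def get_removable_cube_ids_alt (cubes : List (List Int × Int)) (supporting : List (Int × List Int)) (supported_by : List (Int × List Int)) : List (Int × Bool) :=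
  let sb := PySem.Dict.mk supported_by
  let fragile : PySem.Set Int :=
    PySem.Set.ofList (sb.keys.filter (fun s => decide ((sb.getD s []).length ≤ 1)))
  let sp := PySem.Dict.mk supporting
  let removable : PySem.Dict Int Bool :=
    sp.keys.foldl (fun d id => d.insert id (PySem.Set.isdisjoint fragile (sp.getD id []))) PySem.Dict.empty
  -- removable[id] raises KeyError on an id missing from supporting; ported as getD false — Pre_ excludes those inputs
  (cubes.foldl (fun d cube =>
      if removable.getD cube.2 false then d.insert cube.2 true else d)
    PySem.Dict.empty).items

-- ===== PRECONDITION & SPEC =====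
-- Pre_ excludes exactly the inputs where the Python A raises KeyError: a cube id missing
-- from supporting, or a listed supporter missing from supported_by.
def Pre_get_removable_cube_ids (cubes : List (List Int × Int)) (supporting : List (Int × List Int)) (supported_by : List (Int × List Int)) : Prop :=
  ∀ p ∈ cubes, (PySem.Dict.mk supporting).contains p.2 = true ∧
    ∀ s ∈ (PySem.Dict.mk supporting).getD p.2 [], (PySem.Dict.mk supported_by).contains s = true
instance (cubes : List (List Int × Int)) (supporting : List (Int × List Int)) (supported_by : List (Int × List Int)) : Decidable (Pre_get_removable_cube_ids cubes supporting supported_by) := by unfold Pre_get_removable_cube_ids; infer_instance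

def pvWitness_get_removable_cube_ids : (List (List Int × Int)) × (List (Int × List Int)) × (List (Int × List Int)) :=
  ([([1, 2], 0), ([3], 1)], [(0, []), (1, [0])], [(0, [1])])

def Spec_get_removable_cube_ids (cubes : List (List Int × Int)) (supporting : List (Int × List Int)) (supported_by : List (Int × List Int)) (out : List (Int × Bool)) : Prop := out = get_removable_cube_ids_alt cubes supporting supported_by
instance (cubes : List (List Int × Int)) (supporting : List (Int × List Int)) (supported_by : List (Int × List Int)) (out : List (Int × Bool)) : Decidable (Spec_get_removable_cube_ids cubes supporting supported_by out) := by unfold Spec_get_removable_cube_ids; infer_instance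

-- ===== CLAIM (what is proved, stated in full; the proofs are below) =====
def Claim_equal_get_removable_cube_ids : Prop := ∀ (cubes : List (List Int × Int)) (supporting : List (Int × List Int)) (supported_by : List (Int × List Int)), Dom_get_removable_cube_ids cubes supporting supported_by → Pre_get_removable_cube_ids cubes supporting supported_by → Spec_get_removable_cube_ids cubes supporting supported_by (get_removable_cube_ids cubes supporting supported_by)

-- ===== LEMMAS AND PROOFS =====

-- "some supporter is fragile" is the negation of A's per-cube condition
theorem pv_any_not_all (l : List Int) (g : Int → List Int) :
    (l.any (fun s => decide ((g s).length ≤ 1)))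
    = !((l.map (fun s => decide ((g s).length > 1))).all (fun b => b)) := by
  rw [List.all_map, Bool.eq_iff_iff, List.any_eq_true, Bool.not_eq_true', List.all_eq_false]
  constructor
  · rintro ⟨s, hs, h⟩; exact ⟨s, hs, by simp at h ⊢; omega⟩
  · rintro ⟨s, hs, h⟩; exact ⟨s, hs, by simp at h ⊢; omega⟩

theorem pv_any_all (l : List Int) (g : Int → List Int) :
    (l.any (fun s => decide ((g s).length ≤ 1)))
    = !((decide (l.length = 0)) || ((l.map (fun s => decide ((g s).length > 1))).all (fun b => b))) := by
  cases l with
  | nil => simp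
  | cons a t =>
      rw [show (decide ((a :: t).length = 0)) = false by simp, Bool.false_or]
      exact pv_any_not_all _ _

-- set.isdisjoint(l) is the negation of "some element of l is in the set"
theorem pv_disj (s : PySem.Set Int) (l : List Int) :
    PySem.Set.isdisjoint s l = !(l.any (fun x => s.contains x)) := by
  rw [Bool.eq_iff_iff]
  simp [PySem.Set.isdisjoint]
  constructor
  · intro h x hx hs; exact h x hs hx
  · intro h x hs hx; exact h x hx hs

-- for a key s of supported_by, membership in the fragile set is exactly "≤ 1 supporters"
theorem pv_fragile (supported_by : List (Int × List Int)) (s : Int)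
    (h : (PySem.Dict.mk supported_by).contains s = true) :
    ((PySem.Set.ofList ((PySem.Dict.mk supported_by).keys.filter
        (fun k => decide (((PySem.Dict.mk supported_by).getD k []).length ≤ 1)))).contains s)
    = decide (((PySem.Dict.mk supported_by).getD s []).length ≤ 1) := by
  have hk : s ∈ (PySem.Dict.mk supported_by).keys := (PySem.Dict.contains_iff_mem_keys _ _).mp h
  simp only [PySem.Dict.keys] at hk
  simp [PySem.Set.contains, PySem.Set.mem_ofList, List.mem_filter]
  intro _
  simpa using hk

-- a dict comprehension whose value depends only on the key: lookups read the comprehension's function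
theorem pv_table (f : Int → Bool) :
    ∀ (l : List Int) (d : PySem.Dict Int Bool) (id : Int) (dflt : Bool),
      (l.foldl (fun d k => d.insert k (f k)) d).getD id dflt
      = if id ∈ l then f id else d.getD id dflt := by
  intro l
  induction l with
  | nil => intro d id dflt; simp
  | cons a t ih =>
      intro d id dflt
      simp only [List.foldl_cons, ih, List.mem_cons]
      by_cases ht : id ∈ t
      · simp [ht]
      · rw [PySem.Dict.getD_insert]
        by_cases ha : id = a
        · simp [ha]
        · simp [ht, ha]

-- for a key id of supporting whose listed supporters are all keys of supported_by,
-- B's removable-table entry is exactly A's per-cube condition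
theorem pv_cell (supporting supported_by : List (Int × List Int)) (id : Int)
    (h1 : (PySem.Dict.mk supporting).contains id = true)
    (h2 : ∀ s ∈ (PySem.Dict.mk supporting).getD id [],
        (PySem.Dict.mk supported_by).contains s = true) :
    (((PySem.Dict.mk supporting).keys.foldl (fun d k =>
        d.insert k (PySem.Set.isdisjoint
          (PySem.Set.ofList ((PySem.Dict.mk supported_by).keys.filter
            (fun k' => decide (((PySem.Dict.mk supported_by).getD k' []).length ≤ 1))))
          ((PySem.Dict.mk supporting).getD k []))) PySem.Dict.empty).getD id false)
    = ((decide (((PySem.Dict.mk supporting).getD id []).length = 0)) ||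
       ((((PySem.Dict.mk supporting).getD id []).map
          (fun s => decide (((PySem.Dict.mk supported_by).getD s []).length > 1))).all (fun b => b))) := by
  have hk : id ∈ (PySem.Dict.mk supporting).keys := (PySem.Dict.contains_iff_mem_keys _ _).mp h1
  rw [pv_table, if_pos hk, pv_disj]
  have hany : (((PySem.Dict.mk supporting).getD id []).any (fun s =>
        (PySem.Set.ofList ((PySem.Dict.mk supported_by).keys.filter
          (fun k' => decide (((PySem.Dict.mk supported_by).getD k' []).length ≤ 1)))).contains s))
      = (((PySem.Dict.mk supporting).getD id []).any
          (fun s => decide (((PySem.Dict.mk supported_by).getD s []).length ≤ 1))) := by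
    rw [Bool.eq_iff_iff]
    simp only [List.any_eq_true]
    constructor
    · rintro ⟨s, hs, h⟩
      exact ⟨s, hs, by rw [← pv_fragile supported_by s (h2 s hs)]; exact h⟩
    · rintro ⟨s, hs, h⟩
      exact ⟨s, hs, by rw [pv_fragile supported_by s (h2 s hs)]; exact h⟩
  rw [hany, pv_any_all, Bool.not_not]

-- the two folds build the same dict from any accumulator, given the keys Pre_ guarantees
theorem pv_fold (supporting supported_by : List (Int × List Int)) :
    ∀ (cubes : List (List Int × Int)) (d : PySem.Dict Int Bool),
      (∀ p ∈ cubes, (PySem.Dict.mk supporting).contains p.2 = true ∧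
        ∀ s ∈ (PySem.Dict.mk supporting).getD p.2 [],
          (PySem.Dict.mk supported_by).contains s = true) →
      cubes.foldl (fun removable cube =>
          let id := cube.2
          if ((PySem.Dict.mk supporting).getD id []).length = 0 then
            removable.insert id true
          else
            if (((PySem.Dict.mk supporting).getD id []).map
                  (fun supporting_ => decide (((PySem.Dict.mk supported_by).getD supporting_ []).length > 1))).all
                (fun b => b) then
              removable.insert id true
            else removable) d
      = cubes.foldl (fun d cube =>
          if (((PySem.Dict.mk supporting).keys.foldl (fun d k =>
              d.insert k (PySem.Set.isdisjoint
                (PySem.Set.ofList ((PySem.Dict.mk supported_by).keys.filter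
                  (fun k' => decide (((PySem.Dict.mk supported_by).getD k' []).length ≤ 1))))
                ((PySem.Dict.mk supporting).getD k []))) PySem.Dict.empty).getD cube.2 false) then
            d.insert cube.2 true
          else d) d := by
  intro cubes
  induction cubes with
  | nil => intro d _; rfl
  | cons c cs ih =>
      intro d hpre
      have hc := hpre c (by simp)
      have hstep : (if ((PySem.Dict.mk supporting).getD c.2 []).length = 0 then
            d.insert c.2 true
          else
            if (((PySem.Dict.mk supporting).getD c.2 []).map
                  (fun supporting_ => decide (((PySem.Dict.mk supported_by).getD supporting_ []).length > 1))).all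
                (fun b => b) then
              d.insert c.2 true
            else d)
          = (if (((PySem.Dict.mk supporting).keys.foldl (fun d k =>
              d.insert k (PySem.Set.isdisjoint
                (PySem.Set.ofList ((PySem.Dict.mk supported_by).keys.filter
                  (fun k' => decide (((PySem.Dict.mk supported_by).getD k' []).length ≤ 1))))
                ((PySem.Dict.mk supporting).getD k []))) PySem.Dict.empty).getD c.2 false) then
            d.insert c.2 true
          else d) := by
        rw [pv_cell supporting supported_by c.2 hc.1 hc.2]
        by_cases h0 : ((PySem.Dict.mk supporting).getD c.2 []).length = 0
        · simp [h0]
        · by_cases hall : (((PySem.Dict.mk supporting).getD c.2 []).map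
              (fun supporting_ => decide (((PySem.Dict.mk supported_by).getD supporting_ []).length > 1))).all
              (fun b => b)
          · simp [h0, hall]
          · simp [h0, hall]
      simp only [List.foldl_cons]
      rw [hstep]
      exact ih _ (fun p hp => hpre p (by simp [hp]))

-- ===== VERDICT (by name: the statements are the Claim_ definitions above) =====
theorem get_removable_cube_ids_spec : Claim_equal_get_removable_cube_ids := by
  intro cubes supporting supported_by _ hpre
  exact congrArg PySem.Dict.items (pv_fold supporting supported_by cubes PySem.Dict.empty hpre)
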